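-- pv_equiv track=rewrite | github.com/eppou/Numerical-Calculus | Algoritm_Thomas.py | isTridiagonal
-- ===== SOURCE A (Python) =====
-- def isTridiagonal(m):
--     for i in range(0, len(m)):
--         for j in range(0, len(m)):
--             if ((i == j) or (i - 1 == j) or (i + 1 == j)):
--                 if (m[i][j] == 0):
--                     return False
--             else:
--                 if (m[i][j] != 0):
--                     return False
--
--     return True
-- ===== SOURCE B (Python) =====
-- def isTridiagonal(m):
--     n = len(m)
--     pairs = [(j - i, x) for i, row in enumerate(m) for j, x in enumerate(row[:n])]
--     diags = {}
--     for d, x in pairs: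
--         diags.setdefault(d, []).append(x)
--     for d, diag in diags.items():
--         if -1 <= d <= 1:
--             if not all(diag):
--                 return False
--         else:
--             if any(diag):
--                 return False
--     return True
-- ===== Notes on version B (the rewrite author's own statement) =====
-- stated objective: alternative
-- what changed: Replaces A's row-major per-entry scan (nested i,j loops with a band/off-band branch at each cell) by grouping the present entries into diagonals with a dict keyed by j-i built in one pass, then judging each diagonal as a whole (all-nonzero when |d|<=1, all-zero otherwise).
import Mathlib
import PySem

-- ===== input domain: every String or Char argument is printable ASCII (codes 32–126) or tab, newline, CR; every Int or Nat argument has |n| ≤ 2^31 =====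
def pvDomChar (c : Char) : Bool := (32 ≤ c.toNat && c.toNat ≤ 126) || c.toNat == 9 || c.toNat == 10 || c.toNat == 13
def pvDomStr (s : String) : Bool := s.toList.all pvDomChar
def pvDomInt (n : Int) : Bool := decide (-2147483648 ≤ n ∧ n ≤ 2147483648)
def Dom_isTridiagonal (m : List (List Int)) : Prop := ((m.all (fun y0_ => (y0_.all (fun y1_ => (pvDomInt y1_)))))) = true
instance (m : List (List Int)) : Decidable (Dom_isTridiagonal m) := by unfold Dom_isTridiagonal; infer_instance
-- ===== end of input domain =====

-- B groups the present entries into DIAGONALS with a dict keyed by j - i built in one pass, then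
-- judges each diagonal whole (all-nonzero on the band |d| ≤ 1, all-zero off it); same cost as A.

-- ===== PORT A =====
-- m[i][j] ported as pyGetD (always in range on the inputs Pre_ admits); the nested loops with
-- early `return False` become nested `all` over the same ranges.
def isTridiagonal (m : List (List Int)) : Bool :=
  (PySem.List.pyRange 0 (PySem.List.len m) 1).all (fun i =>
    (PySem.List.pyRange 0 (PySem.List.len m) 1).all (fun j =>
      if i == j || i - 1 == j || i + 1 == j then
        !(PySem.List.pyGetD (PySem.List.pyGetD m i []) j 0 == 0)
      else
        (PySem.List.pyGetD (PySem.List.pyGetD m i []) j 0 == 0)))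

-- ===== PORT B =====
-- pairs = [(j - i, x) for i, row in enumerate(m) for j, x in enumerate(row[:n])]
def pvPairs (m : List (List Int)) : List (Int × Int) :=
  (PySem.List.enumerate m 0).flatMap (fun p =>
    (PySem.List.enumerate (PySem.List.slice p.2 none (some (PySem.List.len m))) 0).map
      (fun q => (q.1 - p.1, q.2)))

-- diags = {}; for d, x in pairs: diags.setdefault(d, []).append(x)
def pvDiags (m : List (List Int)) : PySem.Dict Int (List Int) :=
  (pvPairs m).foldl (fun d p => d.modify p.1 [] (fun l => l ++ [p.2])) PySem.Dict.empty

def isTridiagonal_alt (m : List (List Int)) : Bool :=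
  (pvDiags m).items.all (fun p =>
    if -1 ≤ p.1 && p.1 ≤ 1 then p.2.all (fun x => !(x == 0))
    else !(p.2.any (fun x => !(x == 0))))

-- ===== PRECONDITION & SPEC =====
-- entry (i, j) of m satisfies the tridiagonal rule (nonzero on the band |i - j| ≤ 1, zero off it)
def pvCellOk (m : List (List Int)) (i j : Nat) : Prop :=
  ((j + 1 = i ∨ j = i ∨ j = i + 1) → (m.getD i []).getD j 0 ≠ 0) ∧
  (¬(j + 1 = i ∨ j = i ∨ j = i + 1) → (m.getD i []).getD j 0 = 0)

-- row i is scanned by A completely and without a violation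
def pvClean (m : List (List Int)) (i : Nat) : Prop :=
  m.length ≤ (m.getD i []).length ∧ ∀ j, j < m.length → pvCellOk m i j

-- A's scan of row i reaches column (m[i]).length < len(m): IndexError
def pvRowRaises (m : List (List Int)) (i : Nat) : Prop :=
  (m.getD i []).length < m.length ∧ ∀ j, j < (m.getD i []).length → pvCellOk m i j

-- Pre_ excludes exactly the inputs on which A raises IndexError: those where A's row-by-row
-- scan reaches a row shorter than len(m) before meeting any violation.
def Pre_isTridiagonal (m : List (List Int)) : Prop :=
  ∀ i, i < m.length → (∀ i', i' < i → pvClean m i') → ¬ pvRowRaises m i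
instance (m : List (List Int)) : Decidable (Pre_isTridiagonal m) := by
  unfold Pre_isTridiagonal
  have : ∀ i, Decidable (pvClean m i) := fun i => by unfold pvClean pvCellOk; infer_instance
  have : ∀ i, Decidable (pvRowRaises m i) := fun i => by unfold pvRowRaises pvCellOk; infer_instance
  infer_instance

def pvWitness_isTridiagonal : List (List Int) := [[1, 2, 0], [3, 4, 5], [0, 6, 7]]

def Spec_isTridiagonal (m : List (List Int)) (out : Bool) : Prop := out = isTridiagonal_alt m
instance (m : List (List Int)) (out : Bool) : Decidable (Spec_isTridiagonal m out) := by
  unfold Spec_isTridiagonal; infer_instance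

-- ===== CLAIM (what is proved, stated in full; the proofs are below) =====
def Claim_equal_isTridiagonal : Prop := ∀ (m : List (List Int)), Dom_isTridiagonal m → Pre_isTridiagonal m → Spec_isTridiagonal m (isTridiagonal m)

-- ===== LEMMAS AND PROOFS =====

-- A's port: true iff every position (k, j) with k, j < len(m) passes the rule on getD-entries
def pvGood (m : List (List Int)) : Prop :=
  ∀ k j : Nat, k < m.length → j < m.length → pvCellOk m k j

-- B's port: true iff every PRESENT entry (k, j), j < min len(m) len(m[k]), passes the rule
def pvGoodB (m : List (List Int)) : Prop :=
  ∀ k : Nat, k < m.length →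
    ∀ j : Nat, j < min m.length (m.getD k []).length → pvCellOk m k j

theorem pvA_iff (m : List (List Int)) :
    isTridiagonal m = true ↔ pvGood m := by
  unfold isTridiagonal pvGood pvCellOk
  simp only [List.all_eq_true, PySem.List.mem_pyRange_one, PySem.List.len_eq]
  constructor
  · intro h k j hk hj
    have hh := h (k : Int) ⟨by omega, by exact_mod_cast hk⟩ (j : Int) ⟨by omega, by exact_mod_cast hj⟩
    simp only [PySem.List.pyGetD_natCast] at hh
    by_cases hband : (j + 1 = k ∨ j = k ∨ j = k + 1)
    · have : ((k : Int) == (j : Int) || (k : Int) - 1 == (j : Int) || (k : Int) + 1 == (j : Int)) = true := by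
        simp only [beq_iff_eq, Bool.or_eq_true]; omega
      rw [if_pos this] at hh
      constructor
      · intro _; simpa using hh
      · intro hc; exact absurd hband hc
    · have : ((k : Int) == (j : Int) || (k : Int) - 1 == (j : Int) || (k : Int) + 1 == (j : Int)) = false := by
        simp only [Bool.or_eq_false_iff]
        refine ⟨⟨?_, ?_⟩, ?_⟩ <;> simp <;> omega
      rw [if_neg (by simp [this])] at hh
      exact ⟨fun hc => absurd hc hband, fun _ => by simpa using hh⟩
  · intro h i hi j hj
    obtain ⟨hi0, hin⟩ := hi
    obtain ⟨hj0, hjn⟩ := hj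
    lift i to Nat using hi0 with k
    lift j to Nat using hj0 with l
    have hk : k < m.length := by exact_mod_cast hin
    have hl : l < m.length := by exact_mod_cast hjn
    have hh := h k l hk hl
    simp only [PySem.List.pyGetD_natCast]
    by_cases hband : (l + 1 = k ∨ l = k ∨ l = k + 1)
    · rw [if_pos (by simp only [beq_iff_eq, Bool.or_eq_true]; omega)]
      simpa using hh.1 hband
    · rw [if_neg (by simp only [beq_iff_eq, Bool.or_eq_true]; omega)]
      simpa using hh.2 hband

-- a pair of B's build list is exactly (j - k, entry) of a present cell of the n-column window
theorem pvPairs_mem (m : List (List Int)) (p : Int × Int) :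
    p ∈ pvPairs m ↔ ∃ k j : Nat, k < m.length ∧ j < min m.length (m.getD k []).length ∧
      p = ((j : Int) - (k : Int), (m.getD k []).getD j 0) := by
  unfold pvPairs
  rw [List.mem_flatMap]
  constructor
  · rintro ⟨q, hq, hmem⟩
    rw [PySem.List.mem_enumerate_iff] at hq
    obtain ⟨k, hk, rfl⟩ := hq
    rw [List.mem_map] at hmem
    obtain ⟨r, hr, rfl⟩ := hmem
    rw [PySem.List.len_eq, PySem.List.slice_to_natCast, PySem.List.mem_enumerate_iff] at hr
    obtain ⟨j, hj, rfl⟩ := hr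
    have hrow : m.getD k [] = m[k] := List.getD_eq_getElem m [] hk
    have hjlen : j < min m.length m[k].length := by simpa [List.length_take] using hj
    refine ⟨k, j, hk, by rw [hrow]; exact hjlen, ?_⟩
    have hget : (List.take m.length (m[k]'hk))[j]'hj = (m[k]'hk)[j]'(by omega) :=
      List.getElem_take ..
    simp only [Prod.mk.injEq, hget]
    refine ⟨by ring, ?_⟩
    rw [hrow, List.getD_eq_getElem _ 0 (by omega)]
  · rintro ⟨k, j, hk, hj, rfl⟩
    have hrow : m.getD k [] = m[k] := List.getD_eq_getElem m [] hk
    rw [hrow] at hj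
    refine ⟨((0 : Int) + (k : Nat), m[k]'hk), ?_, ?_⟩
    · rw [PySem.List.mem_enumerate_iff]; exact ⟨k, hk, rfl⟩
    · rw [List.mem_map]
      have hjt : j < (List.take m.length (m[k]'hk)).length := by
        simp only [List.length_take]; omega
      refine ⟨((0 : Int) + (j : Nat), (List.take m.length (m[k]'hk))[j]'hjt), ?_, ?_⟩
      · rw [PySem.List.len_eq, PySem.List.slice_to_natCast, PySem.List.mem_enumerate_iff]
        exact ⟨j, hjt, rfl⟩
      · have hget : (List.take m.length (m[k]'hk))[j]'hjt = (m[k]'hk)[j]'(by omega) :=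
          List.getElem_take ..
        simp only [Prod.mk.injEq, hget]
        refine ⟨by ring, ?_⟩
        rw [hrow, List.getD_eq_getElem _ 0 (by omega)]

theorem pvB_iff (m : List (List Int)) :
    isTridiagonal_alt m = true ↔ pvGoodB m := by
  have hnodup : (pvDiags m).keys.Nodup := by
    unfold pvDiags
    exact PySem.Dict.nodup_keys_foldl_modify_key (pvPairs m) Prod.fst [] (fun _ p => (fun l => l ++ [p.2])) _ (by simp [PySem.Dict.keys_empty])
  have hkeys : ∀ d : Int, d ∈ (pvDiags m).keys ↔ d ∈ (pvPairs m).map Prod.fst := by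
    intro d
    unfold pvDiags
    rw [PySem.Dict.keys_foldl_modify_key (pvPairs m) Prod.fst [] (fun _ p => (fun l => l ++ [p.2]))]
    rw [PySem.Set.mem_update]
    simp [PySem.Dict.keys_empty]
  have hgetD : ∀ d : Int, (pvDiags m).getD d [] =
      ((pvPairs m).filter (fun p => p.1 == d)).map (fun p => p.2) := by
    intro d
    unfold pvDiags
    rw [PySem.Dict.getD_foldl_modify_append]
    simp [PySem.Dict.getD_empty]
  have hmemD : ∀ (d x : Int), x ∈ (pvDiags m).getD d [] ↔ (d, x) ∈ pvPairs m := by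
    intro d x
    rw [hgetD]
    simp only [List.mem_map, List.mem_filter, beq_iff_eq]
    constructor
    · rintro ⟨p, ⟨hp, h1⟩, h2⟩
      have : p = (d, x) := by cases p; simp_all
      rwa [this] at hp
    · intro h; exact ⟨(d, x), ⟨h, rfl⟩, rfl⟩
  unfold isTridiagonal_alt pvGoodB pvCellOk
  rw [PySem.Dict.items_eq_map_keys (pvDiags m) hnodup []]
  rw [List.all_map, List.all_eq_true]
  constructor
  · intro h k hk j hj
    set d : Int := (j : Int) - (k : Int) with hd
    have hpair : (d, (m.getD k []).getD j 0) ∈ pvPairs m := by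
      rw [pvPairs_mem]; exact ⟨k, j, hk, hj, rfl⟩
    have hdkey : d ∈ (pvDiags m).keys := by
      rw [hkeys]; exact List.mem_map.mpr ⟨_, hpair, rfl⟩
    have hh := h d hdkey
    have hx : (m.getD k []).getD j 0 ∈ (pvDiags m).getD d [] := (hmemD _ _).mpr hpair
    by_cases hband : (j + 1 = k ∨ j = k ∨ j = k + 1)
    · have hb : (-1 ≤ d && d ≤ 1) = true := by
        simp only [Bool.and_eq_true, decide_eq_true_eq]; omega
      simp only [Function.comp, hb, if_true] at hh
      rw [List.all_eq_true] at hh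
      exact ⟨fun _ => by simpa using hh _ hx, fun hc => absurd hband hc⟩
    · have hb : (-1 ≤ d && d ≤ 1) = false := by
        simp only [Bool.and_eq_false_iff, decide_eq_false_iff_not]; omega
      simp only [Function.comp, hb] at hh
      rw [if_neg (by simp)] at hh
      rw [Bool.not_eq_true', List.any_eq_false] at hh
      exact ⟨fun hc => absurd hc hband, fun _ => by simpa using hh _ hx⟩
  · intro h d hdkey
    simp only [Function.comp]
    by_cases hb : (-1 ≤ d && d ≤ 1) = true
    · rw [hb]
      rw [if_pos rfl, List.all_eq_true]
      intro x hx
      obtain ⟨k, j, hk, hj, hpx⟩ := (pvPairs_mem m _).mp ((hmemD _ _).mp hx)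
      obtain ⟨hd, hxv⟩ := Prod.mk.inj hpx
      simp only [Bool.and_eq_true, decide_eq_true_eq] at hb
      have hband : (j + 1 = k ∨ j = k ∨ j = k + 1) := by omega
      subst hxv
      simpa using (h k hk j hj).1 hband
    · rw [Bool.not_eq_true] at hb
      rw [hb, if_neg (by simp)]
      simp only [Bool.not_eq_true', List.any_eq_false]
      intro x hx
      obtain ⟨k, j, hk, hj, hpx⟩ := (pvPairs_mem m _).mp ((hmemD _ _).mp hx)
      obtain ⟨hd, hxv⟩ := Prod.mk.inj hpx
      simp only [Bool.and_eq_false_iff, decide_eq_false_iff_not] at hb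
      have hband : ¬(j + 1 = k ∨ j = k ∨ j = k + 1) := by omega
      subst hxv
      simpa using (h k hk j hj).2 hband

-- under Pre_, B's (present-entries-only) condition forces every row to be full and clean
theorem pvGoodB_clean (m : List (List Int)) (hpre : Pre_isTridiagonal m)
    (hgb : pvGoodB m) : ∀ i, i < m.length → pvClean m i := by
  intro i
  induction i using Nat.strong_induction_on with
  | _ i ih =>
    intro hi
    have hprev : ∀ i', i' < i → pvClean m i' := fun i' h' => ih i' h' (by omega)
    have hnr := hpre i hi hprev
    have hcells := hgb i hi
    have hlen : m.length ≤ (m.getD i []).length := by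
      by_contra hL
      exact hnr ⟨by omega, fun j hj => hcells j (by omega)⟩
    exact ⟨hlen, fun j hj => hcells j (by omega)⟩

theorem pvGood_iff_goodB (m : List (List Int)) (hpre : Pre_isTridiagonal m) :
    pvGood m ↔ pvGoodB m := by
  constructor
  · intro h k hk j hj
    exact h k j hk (by omega)
  · intro h k j hk hj
    obtain ⟨hlen, hcells⟩ := pvGoodB_clean m hpre h k hk
    exact hcells j hj

-- ===== VERDICT (by name: the statement is the Claim_ definition above) =====
theorem isTridiagonal_spec : Claim_equal_isTridiagonal := by
  intro m _ hpre
  unfold Spec_isTridiagonal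
  have h := (pvA_iff m).trans ((pvGood_iff_goodB m hpre).trans (pvB_iff m).symm)
  cases ha : isTridiagonal m <;> cases hb : isTridiagonal_alt m <;> simp_all
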